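-- pv_equiv track=rewrite | github.com/kovi7/Data-analysis-and-visualization | project_9/python_scripts/filter_induced_disorder.py | find_disorder_fragments
-- ===== SOURCE A (Python) =====
-- def find_disorder_fragments(disorder_string, min_length=40):
--     fragments = []
--     start = None
--
--     for i, char in enumerate(disorder_string):
--         if char == 'D':
--             if start is None:
--                 start = i
--         else:
--             if start is not None:
--                 length = i - start
--                 if length >= min_length:
--                     fragments.append((start, i-1))
--                 start = None
--
--     if start is not None and len(disorder_string) - start >= min_length:
--         fragments.append((start, len(disorder_string)-1))
--
--     return fragments
-- ===== SOURCE B (Python) =====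
-- def find_disorder_fragments(disorder_string, min_length=40):
--     fragments = []
--     n = len(disorder_string)
--     i = 0
--     while i < n:
--         j = disorder_string.find('D', i)
--         if j == -1:
--             break
--         k = j + 1
--         while k < n and disorder_string[k] == 'D':
--             k += 1
--         if k - j >= min_length:
--             fragments.append((j, k - 1))
--         i = k
--     return fragments
-- ===== Notes on version B (the rewrite author's own statement) =====
-- stated objective: faster
-- what changed: Replaces A's per-character start/None state machine (with a separate end-of-string flush) by a run-scan loop: str.find jumps to the start of the next disorder run, an inner scan extends it, and the fragment is emitted immediately, so there is no pending-state flush and most characters are skipped by the C-level find.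
import Mathlib
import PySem

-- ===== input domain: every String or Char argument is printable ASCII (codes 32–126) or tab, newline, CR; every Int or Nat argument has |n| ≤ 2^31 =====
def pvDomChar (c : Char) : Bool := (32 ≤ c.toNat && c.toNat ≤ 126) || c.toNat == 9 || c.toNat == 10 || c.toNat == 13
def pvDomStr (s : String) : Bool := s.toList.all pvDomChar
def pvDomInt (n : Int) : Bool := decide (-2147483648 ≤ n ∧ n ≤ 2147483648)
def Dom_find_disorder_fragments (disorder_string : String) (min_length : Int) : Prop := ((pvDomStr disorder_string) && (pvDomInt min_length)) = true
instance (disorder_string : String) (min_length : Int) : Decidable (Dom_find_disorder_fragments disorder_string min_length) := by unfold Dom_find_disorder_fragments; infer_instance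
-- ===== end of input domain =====

-- B replaces A's per-character start/None state machine by a run-scan loop (str.find skips to the next run, then the run is extended and emitted at once); measured faster by a constant factor.

-- ===== PORT A =====
-- one loop step of A: state = (fragments, start)
def pvStepA (min_length : Int) (st : List (Int × Int) × Option Int) (p : Int × Char) : List (Int × Int) × Option Int :=
  if p.2 = 'D' then
    match st.2 with
    | none => (st.1, some p.1)
    | some _ => st
  else
    match st.2 with
    | none => st
    | some s0 => (if p.1 - s0 ≥ min_length then st.1 ++ [(s0, p.1 - 1)] else st.1, none)

def find_disorder_fragments (disorder_string : String) (min_length : Int) : List (Int × Int) :=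
  let cs := disorder_string.toList
  let st := (PySem.List.enumerate cs).foldl (pvStepA min_length) ([], none)
  match st.2 with
  | none => st.1
  | some s0 =>
    if (cs.length : Int) - s0 ≥ min_length then st.1 ++ [(s0, (cs.length : Int) - 1)] else st.1

-- ===== PORT B =====
-- B's while loop: skip to the next 'D' (str.find, ported as per-char skip), extend the run, emit if long enough, resume after the run
def pvRunScan (min_length : Int) : List Char → Int → List (Int × Int)
  | [], _ => []
  | c :: rest, i =>
    if c = 'D' then
      let t := (rest.takeWhile (· = 'D')).length
      (if (1 + (t : Int)) ≥ min_length then [(i, i + t)] else []) ++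
        pvRunScan min_length (rest.drop t) (i + 1 + t)
    else
      pvRunScan min_length rest (i + 1)
termination_by cs _ => cs.length
decreasing_by
  · simp only [List.length_drop, List.length_cons]; omega
  · simp

def find_disorder_fragments_alt (disorder_string : String) (min_length : Int) : List (Int × Int) :=
  pvRunScan min_length disorder_string.toList 0

-- ===== PRECONDITION & SPEC =====
def Spec_find_disorder_fragments (disorder_string : String) (min_length : Int) (out : List (Int × Int)) : Prop := out = find_disorder_fragments_alt disorder_string min_length
instance (disorder_string : String) (min_length : Int) (out : List (Int × Int)) : Decidable (Spec_find_disorder_fragments disorder_string min_length out) := by unfold Spec_find_disorder_fragments; infer_instance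

-- ===== CLAIM (what is proved, stated in full; the proofs are below) =====
def Claim_equal_find_disorder_fragments : Prop := ∀ (disorder_string : String) (min_length : Int), Dom_find_disorder_fragments disorder_string min_length → Spec_find_disorder_fragments disorder_string min_length (find_disorder_fragments disorder_string min_length)

-- ===== LEMMAS AND PROOFS =====

-- A's state mid-run: scanning cs at index i, with a run open since s0
def pvInRun (min_length : Int) (cs : List Char) (i s0 : Int) : List (Int × Int) :=
  let t := (cs.takeWhile (· = 'D')).length
  (if (i + t) - s0 ≥ min_length then [(s0, i + t - 1)] else []) ++
    pvRunScan min_length (cs.drop t) (i + t)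

def pvState (ml : Int) (cs : List Char) (i : Int) : Option Int → List (Int × Int)
  | none => pvRunScan ml cs i
  | some s0 => pvInRun ml cs i s0

def pvFinish (min_length : Int) (st : List (Int × Int) × Option Int) (n : Int) : List (Int × Int) :=
  match st.2 with
  | none => st.1
  | some s0 => if n - s0 ≥ min_length then st.1 ++ [(s0, n - 1)] else st.1

theorem pvRunScan_cons_D (ml : Int) (rest : List Char) (i : Int) :
    pvRunScan ml ('D' :: rest) i = pvInRun ml rest (i + 1) i := by
  rw [pvRunScan, pvInRun]
  simp only [if_pos rfl]
  congr 1
  split_ifs with h1 h2 <;> first | rfl | (exfalso; omega) | (simp; omega)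

theorem pvInRun_cons_D (ml : Int) (rest : List Char) (i s0 : Int) :
    pvInRun ml ('D' :: rest) i s0 = pvInRun ml rest (i + 1) s0 := by
  unfold pvInRun
  simp only [List.takeWhile_cons, decide_true, if_true, List.length_cons,
    List.drop_succ_cons, Int.natCast_add, Int.natCast_one]
  congr 1
  · split_ifs with h1 h2 <;> first | rfl | (exfalso; omega) | (simp; omega)
  · congr 1
    ring

theorem pvRunScan_cons_not (ml : Int) (c : Char) (rest : List Char) (i : Int) (hc : ¬ c = 'D') :
    pvRunScan ml (c :: rest) i = pvRunScan ml rest (i + 1) := by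
  rw [pvRunScan]; simp [hc]

theorem pvInRun_cons_not (ml : Int) (c : Char) (rest : List Char) (i s0 : Int) (hc : ¬ c = 'D') :
    pvInRun ml (c :: rest) i s0
      = (if i - s0 ≥ ml then [(s0, i - 1)] else []) ++ pvRunScan ml rest (i + 1) := by
  unfold pvInRun
  simp only [List.takeWhile_cons, hc, decide_false, Bool.false_eq_true, if_false,
    List.length_nil, Int.natCast_zero, add_zero, List.drop_zero]
  rw [pvRunScan_cons_not ml c rest i hc]

theorem pvMain (min_length : Int) (cs : List Char) :
    ∀ (i : Int) (acc : List (Int × Int)) (start : Option Int),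
    pvFinish min_length ((PySem.List.enumerate cs i).foldl (pvStepA min_length) (acc, start)) (i + cs.length)
      = acc ++ pvState min_length cs i start := by
  induction cs with
  | nil =>
    intro i acc start
    cases start with
    | none => simp [PySem.List.enumerate, pvFinish, pvState, pvRunScan]
    | some s0 =>
      simp [PySem.List.enumerate, pvFinish, pvState, pvInRun, pvRunScan]
      split_ifs <;> simp
  | cons c rest ih =>
    intro i acc start
    rw [PySem.List.enumerate_cons]
    simp only [List.foldl_cons, List.length_cons]
    push_cast
    rw [show (i + (((rest.length : Int)) + 1)) = (i + 1) + (rest.length : Int) by ring]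
    by_cases hc : c = 'D'
    · subst hc
      cases start with
      | none =>
        rw [show pvStepA min_length (acc, none) (i, 'D') = (acc, some i) by simp [pvStepA]]
        rw [ih (i+1) acc (some i)]
        simp only [pvState]
        rw [pvRunScan_cons_D]
      | some s0 =>
        rw [show pvStepA min_length (acc, some s0) (i, 'D') = (acc, some s0) by simp [pvStepA]]
        rw [ih (i+1) acc (some s0)]
        simp only [pvState]
        rw [pvInRun_cons_D]
    · cases start with
      | none =>
        rw [show pvStepA min_length (acc, none) (i, c) = (acc, none) by simp [pvStepA, hc]]
        rw [ih (i+1) acc none]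
        simp only [pvState]
        rw [pvRunScan_cons_not min_length c rest i hc]
      | some s0 =>
        rw [show pvStepA min_length (acc, some s0) (i, c)
              = (if i - s0 ≥ min_length then acc ++ [(s0, i - 1)] else acc, none) by
            simp [pvStepA, hc]]
        split_ifs with hml
        · rw [ih (i+1) (acc ++ [(s0, i-1)]) none]
          simp only [pvState]
          rw [pvInRun_cons_not min_length c rest i s0 hc]
          simp [hml]
        · rw [ih (i+1) acc none]
          simp only [pvState]
          rw [pvInRun_cons_not min_length c rest i s0 hc]
          simp [hml]

-- ===== VERDICT (by name: the statement is the Claim_ definition above) =====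
theorem find_disorder_fragments_spec : Claim_equal_find_disorder_fragments := by
  intro s ml _
  unfold Spec_find_disorder_fragments find_disorder_fragments find_disorder_fragments_alt
  have h := pvMain ml s.toList 0 [] none
  simp only [zero_add] at h
  simpa [pvFinish, pvState] using h
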